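-- pv_equiv track=rewrite | github.com/Athielme/ENGR162_Project3 | SLAM.py | numToDirScanner
-- ===== SOURCE A (Python) =====
-- def numToDirScanner(number): # convert number to scanner direction
--     while number < 0:
--         number += 4
--
--     number %= 4
--
--     if number == 0:
--         return "F"
--     elif number == 1:
--         return "R"
--     elif number == 2:
--         return "B"
--     elif number == 3:
--         return "L"
-- ===== SOURCE B (Python) =====
-- def numToDirScanner(number): # convert number to scanner direction
--     nxt = {"F": "R", "R": "B", "B": "L", "L": "F"}
--     direction = "F"
--     for _ in range(number % 4):
--         direction = nxt[direction]
--     return direction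
-- ===== Notes on version B (the rewrite author's own statement) =====
-- stated objective: alternative
-- what changed: Instead of normalising with a while-loop and selecting the letter with a four-way if/elif chain, B starts at "F" and follows a successor map {F->R->B->L->F} (number % 4) times, computing the direction by iterated rotation rather than by case analysis.
import Mathlib
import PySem

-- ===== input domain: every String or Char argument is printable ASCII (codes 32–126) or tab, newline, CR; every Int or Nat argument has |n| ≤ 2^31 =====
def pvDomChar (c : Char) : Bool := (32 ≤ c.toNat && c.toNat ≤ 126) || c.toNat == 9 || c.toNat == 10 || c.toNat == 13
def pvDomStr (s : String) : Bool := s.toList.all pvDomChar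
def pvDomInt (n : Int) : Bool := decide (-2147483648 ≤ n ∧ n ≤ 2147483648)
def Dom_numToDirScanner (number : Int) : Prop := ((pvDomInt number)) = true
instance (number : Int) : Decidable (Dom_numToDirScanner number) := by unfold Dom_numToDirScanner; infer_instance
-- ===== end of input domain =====

-- B replaces A's normalising while-loop plus four-way if/elif chain with iterated
-- rotation: start at "F" and follow the successor map F->R->B->L->F (number % 4) times
-- (objective: alternative).

-- ===== PORT A =====
-- while number < 0: number += 4
def numToDirScannerLoop (number : Int) : Int :=
  if number < 0 then numToDirScannerLoop (number + 4) else number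
termination_by (-number).toNat
decreasing_by omega

def numToDirScanner (number : Int) : String :=
  let number := numToDirScannerLoop number
  let number := PySem.Int.mod number 4
  if number == 0 then "F"
  else if number == 1 then "R"
  else if number == 2 then "B"
  else if number == 3 then "L"
  else ""  -- Python's implicit None; unreachable since number % 4 ∈ {0,1,2,3}

-- ===== PORT B =====
-- nxt = {"F": "R", "R": "B", "B": "L", "L": "F"}; start at "F", rotate (number % 4) times
def numToDirScanner_alt (number : Int) : String :=
  let nxt : PySem.Dict String String := PySem.Dict.ofList [("F", "R"), ("R", "B"), ("B", "L"), ("L", "F")]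
  (PySem.List.pyRange 0 (PySem.Int.mod number 4) 1).foldl
    (fun direction _ => PySem.Dict.getD nxt direction "") "F"
    -- nxt[direction] never misses its key, so the getD default is unreachable

-- ===== PRECONDITION & SPEC =====
def Spec_numToDirScanner (number : Int) (out : String) : Prop := out = numToDirScanner_alt number
instance (number : Int) (out : String) : Decidable (Spec_numToDirScanner number out) := by unfold Spec_numToDirScanner; infer_instance

-- ===== CLAIM =====
def Claim_equal_numToDirScanner : Prop := ∀ (number : Int), Dom_numToDirScanner number → Spec_numToDirScanner number (numToDirScanner number)

-- ===== LEMMAS AND PROOFS =====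
theorem numToDirScannerLoop_mod (number : Int) :
    PySem.Int.mod (numToDirScannerLoop number) 4 = PySem.Int.mod number 4 := by
  induction number using numToDirScannerLoop.induct with
  | case1 n h ih =>
    rw [numToDirScannerLoop, if_pos h, ih]
    simp [PySem.Int.mod]
  | case2 n h =>
    rw [numToDirScannerLoop, if_neg h]

-- ===== VERDICT =====
theorem numToDirScanner_spec : Claim_equal_numToDirScanner := by
  intro number _
  unfold Spec_numToDirScanner
  simp only [numToDirScanner, numToDirScanner_alt]
  rw [numToDirScannerLoop_mod]
  have h : PySem.Int.mod number 4 = 0 ∨ PySem.Int.mod number 4 = 1 ∨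
      PySem.Int.mod number 4 = 2 ∨ PySem.Int.mod number 4 = 3 := by
    have hfe : Int.fmod number 4 = number % 4 := by
      rw [Int.fmod_eq_emod]; norm_num
    unfold PySem.Int.mod
    omega
  rcases h with h | h | h | h <;> rw [h] <;> decide
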